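-- pv_equiv track=rewrite | github.com/AswathiMohan23/Logical_codes_python | logical/move_capital_to_front.py | capToFront
-- ===== SOURCE A (Python) =====
-- def capToFront(word):
--     caps=[]
--     small=[]
--     output=[]
--
--     result=[[i for i in word]]
--     for i in word:
--         if i == i.upper():
--             caps.append(i)
--         else:
--             small.append(i)
--     output.extend(caps)
--     output.extend(small)
--     return "".join(output)
-- ===== SOURCE B (Python) =====
-- def capToFront(word):
--     # stable sort: characters equal to their uppercase form get key False and go first
--     return "".join(sorted(word, key=lambda c: c != c.upper()))
-- ===== Notes on version B (the rewrite author's own statement) =====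
-- stated objective: idiomatic
-- what changed: Replaces the two explicit accumulator lists and final concatenation with a single stable sort keyed on c != c.upper(), whose stability yields the same partition order.
import Mathlib
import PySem

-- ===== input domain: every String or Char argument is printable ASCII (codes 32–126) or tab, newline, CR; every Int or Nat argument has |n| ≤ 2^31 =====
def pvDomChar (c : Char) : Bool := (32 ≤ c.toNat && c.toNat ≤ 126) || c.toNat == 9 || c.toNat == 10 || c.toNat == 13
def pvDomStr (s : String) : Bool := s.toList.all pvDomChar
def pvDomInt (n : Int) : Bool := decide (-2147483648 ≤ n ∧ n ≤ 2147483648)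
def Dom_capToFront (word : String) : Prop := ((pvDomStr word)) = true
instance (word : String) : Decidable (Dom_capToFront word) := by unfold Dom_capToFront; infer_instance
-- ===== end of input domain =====

-- B replaces A's two accumulator lists and concatenation by one stable sort
-- keyed on "c differs from its uppercase form" (idiomatic; not faster).

-- ===== PORT A =====
-- i.upper() on a single character is PySem.Chars.upperChar (exact on ASCII).
-- The dead `result=[[i for i in word]]` binding is omitted (it is never used).
def capToFront (word : String) : String :=
  let pair := word.toList.foldl
    (fun (st : List Char × List Char) i =>
      if i == PySem.Chars.upperChar i then (st.1 ++ [i], st.2) else (st.1, st.2 ++ [i]))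
    ([], [])
  let output := pair.1 ++ pair.2
  String.mk output

-- ===== PORT B =====
-- Python's bool sort key (False < True) is ported as the Int key 0/1 (same order).
def capToFront_alt (word : String) : String :=
  String.mk (PySem.List.sorted word.toList
    (fun c => if c == PySem.Chars.upperChar c then (0 : Int) else 1))

-- ===== PRECONDITION & SPEC =====
def Spec_capToFront (word : String) (out : String) : Prop := out = capToFront_alt word
instance (word : String) (out : String) : Decidable (Spec_capToFront word out) := by unfold Spec_capToFront; infer_instance

-- ===== CLAIM (what is proved, stated in full; the proofs are below) =====
def Claim_equal_capToFront : Prop := ∀ (word : String), Dom_capToFront word → Spec_capToFront word (capToFront word)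

-- ===== LEMMAS AND PROOFS =====
def pvP (c : Char) : Bool := c == PySem.Chars.upperChar c

def pvKey (c : Char) : Int := if c == PySem.Chars.upperChar c then 0 else 1

lemma pvKey_true {c : Char} (h : pvP c = true) : pvKey c = 0 := by
  unfold pvP at h; unfold pvKey; rw [h]; rfl

lemma pvKey_false {c : Char} (h : pvP c = false) : pvKey c = 1 := by
  unfold pvP at h; unfold pvKey; rw [h]; rfl

lemma ins_smalls (x : Char) (hx : pvP x = false) (smalls : List Char)
    (h2 : ∀ c ∈ smalls, pvP c = false) :
    PySem.List.insertBy (fun a b => decide (pvKey a < pvKey b)) x smalls = smalls ++ [x] := by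
  induction smalls with
  | nil => simp [PySem.List.insertBy]
  | cons y ys ih =>
    have hy : pvP y = false := h2 y (by simp)
    simp [PySem.List.insertBy, pvKey_false hx, pvKey_false hy,
      ih (fun c hc => h2 c (by simp [hc]))]

lemma ins_mixed (x : Char) (caps smalls : List Char)
    (h1 : ∀ c ∈ caps, pvP c = true) (h2 : ∀ c ∈ smalls, pvP c = false) :
    PySem.List.insertBy (fun a b => decide (pvKey a < pvKey b)) x (caps ++ smalls)
      = if pvP x then caps ++ x :: smalls else (caps ++ smalls) ++ [x] := by
  induction caps with
  | nil =>
    simp only [List.nil_append]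
    cases hx : pvP x with
    | true =>
      cases smalls with
      | nil => simp [PySem.List.insertBy]
      | cons y ys =>
        have hy : pvP y = false := h2 y (by simp)
        simp [PySem.List.insertBy, pvKey_true hx, pvKey_false hy]
    | false =>
      simp [ins_smalls x hx smalls h2]
  | cons c cs ih =>
    have hc : pvP c = true := h1 c (by simp)
    have hkc : pvKey c = 0 := pvKey_true hc
    have hnb : decide (pvKey x < pvKey c) = false := by
      cases hx : pvP x with
      | true => simp [pvKey_true hx, hkc]
      | false => simp [pvKey_false hx, hkc]
    have ih' := ih (fun d hd => h1 d (by simp [hd]))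
    simp only [List.cons_append, PySem.List.insertBy, hnb]
    rw [ih']
    cases hx : pvP x <;> simp

lemma foldl_ins (xs : List Char) (caps smalls : List Char)
    (h1 : ∀ c ∈ caps, pvP c = true) (h2 : ∀ c ∈ smalls, pvP c = false) :
    xs.foldl (fun acc x => PySem.List.insertBy (fun a b => decide (pvKey a < pvKey b)) x acc)
      (caps ++ smalls)
      = (caps ++ xs.filter pvP) ++ (smalls ++ xs.filter (fun c => !pvP c)) := by
  induction xs generalizing caps smalls with
  | nil => simp
  | cons x xs ih =>
    simp only [List.foldl_cons, ins_mixed x caps smalls h1 h2]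
    cases hx : pvP x with
    | true =>
      rw [if_pos rfl, show caps ++ x :: smalls = (caps ++ [x]) ++ smalls by simp,
        ih (caps ++ [x]) smalls
          (by intro c hc; rcases List.mem_append.1 hc with h | h
              · exact h1 c h
              · simp at h; subst h; exact hx) h2]
      simp [List.filter_cons, hx]
    | false =>
      rw [if_neg (by simp)]
      have : (caps ++ smalls) ++ [x] = caps ++ (smalls ++ [x]) := by simp
      rw [this, ih caps (smalls ++ [x]) h1
        (by intro c hc; rcases List.mem_append.1 hc with h | h
            · exact h2 c h
            · simp at h; subst h; exact hx)]
      simp [List.filter_cons, hx]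

lemma foldl_A (xs : List Char) (a b : List Char) :
    xs.foldl
      (fun (st : List Char × List Char) i =>
        if i == PySem.Chars.upperChar i then (st.1 ++ [i], st.2) else (st.1, st.2 ++ [i]))
      (a, b)
      = (a ++ xs.filter pvP, b ++ xs.filter (fun c => !pvP c)) := by
  induction xs generalizing a b with
  | nil => simp
  | cons x xs ih =>
    simp only [List.foldl_cons]
    cases hx : pvP x with
    | true =>
      have hx' : (x == PySem.Chars.upperChar x) = true := hx
      rw [if_pos hx', ih (a ++ [x]) b]
      simp [List.filter_cons, hx]
    | false =>
      have hx' : ¬ ((x == PySem.Chars.upperChar x) = true) := by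
        unfold pvP at hx; simp [hx]
      rw [if_neg hx', ih a (b ++ [x])]
      simp [List.filter_cons, hx]

lemma key_eq (c : Char) :
    (if c == PySem.Chars.upperChar c then (0 : Int) else 1) = pvKey c := rfl

-- ===== VERDICT (by name: the statement is the Claim_ definition above) =====
theorem capToFront_spec : Claim_equal_capToFront := by
  intro word _
  show capToFront word = capToFront_alt word
  unfold capToFront capToFront_alt
  rw [PySem.List.sorted_eq_foldl_insertBy]
  simp only [key_eq]
  rw [foldl_A word.toList [] []]
  have := foldl_ins word.toList [] [] (by simp) (by simp)
  simp only [List.nil_append] at this ⊢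
  exact congrArg String.mk this.symm
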